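-- pv_equiv track=rewrite | github.com/doramirdor/getnadir.dev | backend/app/services/enhanced_litellm_router.py | _sort_fallback_models
-- ===== SOURCE A (Python) =====
-- from typing import Dict, Any, List, Optional, Union, AsyncGenerator, Tuple
--
-- def _sort_fallback_models(model_name: str, other_models: List[str]) -> List[str]:
--     """Sort fallback models by preference/capability similarity."""
--     # Define provider preferences and capabilities
--     provider_map = {
--         "gpt-4o-mini": "openai",
--         "gpt-4o": "openai",
--         "gpt-4": "openai",
--         "gpt-3.5-turbo": "openai",
--         "claude-3-haiku-20240307": "anthropic",
--         "claude-3-sonnet-20240229": "anthropic",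
--         "claude-3-opus-20240229": "anthropic",
--         "gemini-1.5-flash": "google",
--         "gemini-1.5-pro": "google",
--         "gemini-1.0-pro": "google"
--     }
--
--     model_provider = provider_map.get(model_name, "unknown")
--
--     # Score other models based on similarity and capability
--     scored_models = []
--     for other_model in other_models:
--         other_provider = provider_map.get(other_model, "unknown")
--
--         score = 0
--         # Same provider gets bonus
--         if other_provider == model_provider:
--             score += 10
--
--         # Capability-based scoring (rough)
--         if "gpt-4" in model_name and "gpt-4" in other_model:
--             score += 5
--         elif "claude-3" in model_name and "claude-3" in other_model:
--             score += 5
--         elif "gemini" in model_name and "gemini" in other_model: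
--             score += 5
--
--         # Cost considerations (cheaper models as fallbacks)
--         if "mini" in other_model or "haiku" in other_model or "flash" in other_model:
--             score += 3
--
--         scored_models.append((other_model, score))
--
--     # Sort by score (descending)
--     scored_models.sort(key=lambda x: x[1], reverse=True)
--
--     return [model for model, score in scored_models]
-- ===== SOURCE B (Python) =====
-- def _sort_fallback_models(model_name, other_models):
--     """Counting sort: bucket each model by its 0..18 similarity score, emit buckets high-to-low."""
--     providers = {
--         "openai": ["gpt-4o-mini", "gpt-4o", "gpt-4", "gpt-3.5-turbo"],
--         "anthropic": ["claude-3-haiku-20240307", "claude-3-sonnet-20240229", "claude-3-opus-20240229"],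
--         "google": ["gemini-1.5-flash", "gemini-1.5-pro", "gemini-1.0-pro"],
--     }
--     provider_map = {m: p for p, models in providers.items() for m in models}
--     model_provider = provider_map.get(model_name, "unknown")
--
--     def score(m):
--         s = 10 if provider_map.get(m, "unknown") == model_provider else 0
--         if "gpt-4" in model_name and "gpt-4" in m:
--             s += 5
--         elif "claude-3" in model_name and "claude-3" in m:
--             s += 5
--         elif "gemini" in model_name and "gemini" in m:
--             s += 5
--         if "mini" in m or "haiku" in m or "flash" in m:
--             s += 3
--         return s
--
--     buckets = {}
--     for pair in [(score(m), m) for m in other_models]: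
--         buckets.setdefault(pair[0], []).append(pair[1])
--
--     result = []
--     for s in range(18, -1, -1):
--         result.extend(buckets.get(s, []))
--     return result
-- ===== Notes on version B (the rewrite author's own statement) =====
-- stated objective: alternative
-- what changed: B replaces A's comparison sort of (model, score) pairs with a counting sort: a single scoring pass drops each model into the bucket of its bounded score (0..18) and the buckets are concatenated from score 18 down to 0, preserving the stable tie order.
import Mathlib
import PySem

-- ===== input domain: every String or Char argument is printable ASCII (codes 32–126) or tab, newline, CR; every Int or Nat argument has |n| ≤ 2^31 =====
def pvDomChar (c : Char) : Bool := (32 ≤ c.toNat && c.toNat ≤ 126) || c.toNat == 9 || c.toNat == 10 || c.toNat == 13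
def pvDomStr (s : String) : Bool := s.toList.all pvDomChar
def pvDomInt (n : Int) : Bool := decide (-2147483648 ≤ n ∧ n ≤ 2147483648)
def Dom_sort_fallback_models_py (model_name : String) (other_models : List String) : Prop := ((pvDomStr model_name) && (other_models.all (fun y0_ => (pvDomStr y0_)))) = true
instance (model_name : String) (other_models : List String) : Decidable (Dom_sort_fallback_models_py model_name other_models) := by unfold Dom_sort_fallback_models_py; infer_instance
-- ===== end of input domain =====

-- B replaces A's comparison sort of (model, score) pairs by a counting sort: one pass
-- dropping each model into the bucket of its bounded score (0..18), then the buckets are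
-- emitted from score 18 down to 0 (objective: alternative algorithm; same observable result).

-- ===== PORT A =====
-- A-side helper: the literal provider_map dict of A.
def pvProviderMapA : PySem.Dict String String := PySem.Dict.ofList [
  ("gpt-4o-mini", "openai"),
  ("gpt-4o", "openai"),
  ("gpt-4", "openai"),
  ("gpt-3.5-turbo", "openai"),
  ("claude-3-haiku-20240307", "anthropic"),
  ("claude-3-sonnet-20240229", "anthropic"),
  ("claude-3-opus-20240229", "anthropic"),
  ("gemini-1.5-flash", "google"),
  ("gemini-1.5-pro", "google"),
  ("gemini-1.0-pro", "google")]

def sort_fallback_models_py (model_name : String) (other_models : List String) : List String :=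
  let provider_map := pvProviderMapA
  let model_provider := provider_map.getD model_name "unknown"
  let scored_models : List (String × Int) := other_models.foldl (fun acc other_model =>
    let other_provider := provider_map.getD other_model "unknown"
    let score : Int := 0
    let score := if other_provider == model_provider then score + 10 else score
    let score :=
      if PySem.Str.isIn "gpt-4" model_name && PySem.Str.isIn "gpt-4" other_model then score + 5
      else if PySem.Str.isIn "claude-3" model_name && PySem.Str.isIn "claude-3" other_model then score + 5
      else if PySem.Str.isIn "gemini" model_name && PySem.Str.isIn "gemini" other_model then score + 5
      else score
    let score :=
      if PySem.Str.isIn "mini" other_model || PySem.Str.isIn "haiku" other_model || PySem.Str.isIn "flash" other_model then score + 3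
      else score
    acc ++ [(other_model, score)]) []
  (PySem.List.sorted scored_models (fun x => x.2) true).map (fun p => p.1)

-- ===== PORT B =====
-- B-side helpers: provider_map built from the per-provider model lists, and B's score closure.
def pvProvidersB : PySem.Dict String (List String) := PySem.Dict.ofList [
  ("openai", ["gpt-4o-mini", "gpt-4o", "gpt-4", "gpt-3.5-turbo"]),
  ("anthropic", ["claude-3-haiku-20240307", "claude-3-sonnet-20240229", "claude-3-opus-20240229"]),
  ("google", ["gemini-1.5-flash", "gemini-1.5-pro", "gemini-1.0-pro"])]

def pvProviderMapB : PySem.Dict String String :=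
  pvProvidersB.items.foldl (fun d pm => pm.2.foldl (fun d m => d.insert m pm.1) d) PySem.Dict.empty

def pvScoreB (model_name m : String) : Int :=
  let model_provider := pvProviderMapB.getD model_name "unknown"
  let s : Int := if pvProviderMapB.getD m "unknown" == model_provider then 10 else 0
  let s :=
    if PySem.Str.isIn "gpt-4" model_name && PySem.Str.isIn "gpt-4" m then s + 5
    else if PySem.Str.isIn "claude-3" model_name && PySem.Str.isIn "claude-3" m then s + 5
    else if PySem.Str.isIn "gemini" model_name && PySem.Str.isIn "gemini" m then s + 5
    else s
  let s :=
    if PySem.Str.isIn "mini" m || PySem.Str.isIn "haiku" m || PySem.Str.isIn "flash" m then s + 3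
    else s
  s

def sort_fallback_models_py_alt (model_name : String) (other_models : List String) : List String :=
  let buckets : PySem.Dict Int (List String) :=
    (other_models.map (fun m => (pvScoreB model_name m, m))).foldl
      (fun d p => d.modify p.1 [] (fun l => l ++ [p.2])) PySem.Dict.empty
  (PySem.List.pyRange 18 (-1) (-1)).foldl (fun acc s => acc ++ buckets.getD s []) []

-- ===== PRECONDITION & SPEC =====
def Spec_sort_fallback_models_py (model_name : String) (other_models : List String) (out : List String) : Prop := out = sort_fallback_models_py_alt model_name other_models
instance (model_name : String) (other_models : List String) (out : List String) : Decidable (Spec_sort_fallback_models_py model_name other_models out) := by unfold Spec_sort_fallback_models_py; infer_instance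

-- ===== CLAIM (what is proved, stated in full; the proofs are below) =====
def Claim_equal_sort_fallback_models_py : Prop := ∀ (model_name : String) (other_models : List String), Dom_sort_fallback_models_py model_name other_models → Spec_sort_fallback_models_py model_name other_models (sort_fallback_models_py model_name other_models)

-- ===== LEMMAS AND PROOFS =====

-- Proof-side name for the score A's loop body computes.
def pvScoreA (model_name other_model : String) : Int :=
  let model_provider := pvProviderMapA.getD model_name "unknown"
  let other_provider := pvProviderMapA.getD other_model "unknown"
  let score : Int := 0
  let score := if other_provider == model_provider then score + 10 else score
  let score :=
    if PySem.Str.isIn "gpt-4" model_name && PySem.Str.isIn "gpt-4" other_model then score + 5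
    else if PySem.Str.isIn "claude-3" model_name && PySem.Str.isIn "claude-3" other_model then score + 5
    else if PySem.Str.isIn "gemini" model_name && PySem.Str.isIn "gemini" other_model then score + 5
    else score
  let score :=
    if PySem.Str.isIn "mini" other_model || PySem.Str.isIn "haiku" other_model || PySem.Str.isIn "flash" other_model then score + 3
    else score
  score

lemma pv_providerMap_eq : pvProviderMapA = pvProviderMapB := by decide

lemma pv_score_eq (mn m : String) : pvScoreA mn m = pvScoreB mn m := by
  simp only [pvScoreA, pvScoreB]
  rw [pv_providerMap_eq]
  split_ifs <;> norm_num

lemma pv_score_bounds (mn m : String) : 0 ≤ pvScoreB mn m ∧ pvScoreB mn m ≤ 18 := by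
  simp only [pvScoreB]
  split_ifs <;> norm_num

lemma pv_mem_ss {k : Int} (h0 : 0 ≤ k) (h1 : k ≤ 18) :
    k ∈ PySem.List.pyRange 18 (-1) (-1) := by
  have h : PySem.List.pyRange 18 (-1) (-1)
      = [18,17,16,15,14,13,12,11,10,9,8,7,6,5,4,3,2,1,0] := by decide
  rw [h]
  simp only [List.mem_cons, List.not_mem_nil, or_false]
  omega

lemma pv_insertBy_all_true {α : Type} (before : α → α → Bool) (x : α) (l : List α)
    (h : ∀ y ∈ l, before x y = true) : PySem.List.insertBy before x l = x :: l := by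
  cases l with
  | nil => rfl
  | cons y t => simp [PySem.List.insertBy, h y (by simp)]

lemma pv_insertBy_append {α : Type} (before : α → α → Bool) (x : α) (l1 l2 : List α)
    (h : ∀ y ∈ l1, before x y = false) :
    PySem.List.insertBy before x (l1 ++ l2) = l1 ++ PySem.List.insertBy before x l2 := by
  induction l1 with
  | nil => rfl
  | cons y t ih =>
    have hy : before x y = false := h y (by simp)
    simp only [List.cons_append, PySem.List.insertBy, hy]
    simp only [Bool.false_eq_true, if_false, List.cons.injEq, true_and]
    exact ih (fun z hz => h z (by simp [hz]))

-- Inserting x (stable, descending by key) into a descending-bucketed list appends x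
-- at the end of its own bucket.
lemma pv_insertBy_bucket {α : Type} (key : α → Int) (x : α) :
    ∀ (ss : List Int), ss.Pairwise (· > ·) → key x ∈ ss → ∀ (ys : List α),
    PySem.List.insertBy (fun a b => decide (key b < key a)) x
        (ss.flatMap (fun s => ys.filter (fun y => decide (key y = s))))
      = ss.flatMap (fun s => (ys ++ [x]).filter (fun y => decide (key y = s))) := by
  intro ss
  induction ss with
  | nil => intro _ hx; simp at hx
  | cons s ss ih =>
    intro hp hx ys
    have hgt : ∀ s' ∈ ss, s > s' := (List.pairwise_cons.mp hp).1
    have hrest : ∀ y ∈ ss.flatMap (fun s => ys.filter (fun y => decide (key y = s))),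
        key y ∈ ss := by
      intro y hy
      rcases List.mem_flatMap.mp hy with ⟨s', hs', hy'⟩
      have := of_decide_eq_true (List.mem_filter.mp hy').2
      rw [this]; exact hs'
    by_cases hxs : key x = s
    · -- x belongs to the first bucket: skip it, then x goes in front of the rest.
      rw [List.flatMap_cons, List.flatMap_cons,
          pv_insertBy_append _ _ _ _ (by
            intro y hy
            have := of_decide_eq_true (List.mem_filter.mp hy).2
            simp [this, hxs]),
          pv_insertBy_all_true _ _ _ (by
            intro y hy
            have h' := hrest y hy
            have := hgt _ h'
            simp; omega)]
      have h1 : (ys ++ [x]).filter (fun y => decide (key y = s))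
          = ys.filter (fun y => decide (key y = s)) ++ [x] := by
        simp [List.filter_append, hxs]
      have h2 : ss.flatMap (fun s' => (ys ++ [x]).filter (fun y => decide (key y = s')))
          = ss.flatMap (fun s' => ys.filter (fun y => decide (key y = s'))) := by
        apply List.flatMap_congr
        intro s' hs'
        have : key x ≠ s' := by have := hgt s' hs'; omega
        simp [List.filter_append, this]
      rw [h1, h2]
      simp
    · -- x belongs further down: skip the whole first bucket.
      have hx' : key x ∈ ss := by
        rcases List.mem_cons.mp hx with h | h
        · exact absurd h hxs
        · exact h
      rw [List.flatMap_cons, List.flatMap_cons,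
          pv_insertBy_append _ _ _ _ (by
            intro y hy
            have hk := of_decide_eq_true (List.mem_filter.mp hy).2
            have : s > key x := by
              rcases List.mem_cons.mp hx with h | h
              · exact absurd h hxs
              · exact hgt _ h
            simp [hk]; omega),
          ih (List.pairwise_cons.mp hp).2 hx' ys]
      have h1 : (ys ++ [x]).filter (fun y => decide (key y = s))
          = ys.filter (fun y => decide (key y = s)) := by
        simp [List.filter_append, hxs]
      rw [h1]

-- A stable descending sort by an Int key with all keys in a strictly-decreasing list ss
-- is the concatenation of the per-key buckets in ss order.
lemma pv_bucket_sorted {α : Type} (key : α → Int) (ss : List Int)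
    (hp : ss.Pairwise (· > ·)) :
    ∀ (xs : List α), (∀ x ∈ xs, key x ∈ ss) →
    PySem.List.sorted xs key true = ss.flatMap (fun s => xs.filter (fun y => decide (key y = s))) := by
  intro xs
  induction xs using List.reverseRecOn with
  | nil => intro _; simp [PySem.List.sorted]
  | append_singleton ys x ih =>
    intro h
    rw [PySem.List.sorted_rev_eq_foldl_insertBy, List.foldl_append]
    simp only [List.foldl_cons, List.foldl_nil]
    rw [← PySem.List.sorted_rev_eq_foldl_insertBy,
        ih (fun y hy => h y (by simp [hy])),
        pv_insertBy_bucket key x ss hp (h x (by simp)) ys]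

-- ===== VERDICT (by name: the statement is the Claim_ definition above) =====
theorem sort_fallback_models_py_spec : Claim_equal_sort_fallback_models_py := by
  intro mn oms _
  unfold Spec_sort_fallback_models_py sort_fallback_models_py sort_fallback_models_py_alt
  simp only []
  -- A's pair-building loop is a map
  rw [show (fun (acc : List (String × Int)) (other_model : String) =>
        let other_provider := pvProviderMapA.getD other_model "unknown"
        let score : Int := 0
        let score := if other_provider == pvProviderMapA.getD mn "unknown" then score + 10 else score
        let score :=
          if PySem.Str.isIn "gpt-4" mn && PySem.Str.isIn "gpt-4" other_model then score + 5
          else if PySem.Str.isIn "claude-3" mn && PySem.Str.isIn "claude-3" other_model then score + 5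
          else if PySem.Str.isIn "gemini" mn && PySem.Str.isIn "gemini" other_model then score + 5
          else score
        let score :=
          if PySem.Str.isIn "mini" other_model || PySem.Str.isIn "haiku" other_model || PySem.Str.isIn "flash" other_model then score + 3
          else score
        acc ++ [(other_model, score)])
      = (fun acc x => acc ++ [(fun m => (m, pvScoreA mn m)) x]) from rfl,
     PySem.List.foldl_append_singleton_eq_map]
  rw [PySem.List.foldl_append_eq_flatMap]
  simp only [List.nil_append]
  have hb : ∀ s : Int,
      ((oms.map (fun m => (pvScoreB mn m, m))).foldl
          (fun d p => d.modify p.1 [] (fun l => l ++ [p.2])) PySem.Dict.empty).getD s []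
        = oms.filter (fun m => decide (pvScoreB mn m = s)) := by
    intro s
    rw [PySem.Dict.getD_foldl_modify_append, PySem.Dict.getD_empty, List.filter_map, List.map_map]
    simp [Function.comp_def]
    apply List.filter_congr
    intro m _
    rfl
  have hkeys : ∀ p ∈ oms.map (fun m => (m, pvScoreA mn m)),
      (fun p : String × Int => p.2) p ∈ PySem.List.pyRange 18 (-1) (-1) := by
    intro p hp
    rcases List.mem_map.mp hp with ⟨m, hm, rfl⟩
    simp only [pv_score_eq]
    exact pv_mem_ss (pv_score_bounds mn m).1 (pv_score_bounds mn m).2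
  rw [pv_bucket_sorted (fun p : String × Int => p.2) _ (by decide) _ hkeys, List.map_flatMap]
  apply List.flatMap_congr
  intro s _
  rw [hb s, List.filter_map, List.map_map]
  simp [Function.comp_def, pv_score_eq]
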